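-- pv_equiv track=rewrite | github.com/SuperflyingNose/lab4 | lib.py | func
-- ===== SOURCE A (Python) =====
-- def func (mas):
--     N = len(mas)
--     n = len(mas[0])
--     k = 0
--     for i in range (n):
--         t = True
--         for j in range (1, N):
--             if (mas[0][i] in mas[j]) != True:
--                 t = False
--                 break
--         if t == True:
--             k = k + 1
--     return k
-- ===== SOURCE B (Python) =====
-- def func(mas):
--     rows = mas[1:]
--     if not rows:
--         return len(mas[0])
--     common = set(rows[0])
--     for r in rows[1:]:
--         common &= set(r)
--     return sum(1 for x in mas[0] if x in common)
-- ===== Notes on version B (the rewrite author's own statement) =====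
-- stated objective: alternative
-- what changed: Instead of scanning every other row per first-row element (nested list-membership scans with break), B folds rows 1..N-1 into a single set intersection and then counts first-row elements by membership in it in one flat pass.
import Mathlib
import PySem

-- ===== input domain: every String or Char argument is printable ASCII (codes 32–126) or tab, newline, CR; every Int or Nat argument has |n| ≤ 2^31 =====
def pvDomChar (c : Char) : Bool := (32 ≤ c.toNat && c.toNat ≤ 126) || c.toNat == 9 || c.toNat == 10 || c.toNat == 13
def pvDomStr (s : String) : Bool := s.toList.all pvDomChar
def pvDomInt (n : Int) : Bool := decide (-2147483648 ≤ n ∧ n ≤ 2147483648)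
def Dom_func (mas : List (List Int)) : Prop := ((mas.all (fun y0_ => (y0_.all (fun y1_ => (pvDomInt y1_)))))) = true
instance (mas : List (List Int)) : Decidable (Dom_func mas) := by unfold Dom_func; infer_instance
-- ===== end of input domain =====

-- B replaces A's per-element scan of all other rows by one fold-to-intersection set plus a single counting pass (alternative decomposition).
-- ===== PORT A =====
-- inner loop 'for j in range(1, N): if (mas[0][i] in mas[j]) != True: t = False; break'
def funcInner (x : Int) : List (List Int) → Bool
  | [] => true
  | row :: rest => if (row.contains x) != true then false else funcInner x rest

def func (mas : List (List Int)) : Int :=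
  let head := mas.headD []
  let n := head.length
  (List.range n).foldl (fun k i =>
    let t := funcInner (head.getD i 0) (mas.drop 1)
    if t = true then k + 1 else k) 0

-- ===== PORT B =====
def func_alt (mas : List (List Int)) : Int :=
  let rows := mas.drop 1
  match rows with
  | [] => ((mas.headD []).length : Int)
  | r0 :: rest =>
    let common := rest.foldl (fun c r => PySem.Set.inter c (PySem.Set.ofList r)) (PySem.Set.ofList r0)
    (mas.headD []).foldl (fun k x => if PySem.Set.contains common x then k + 1 else k) 0

-- ===== PRECONDITION & SPEC =====
-- Pre_ excludes only the empty outer list, on which A raises IndexError (mas[0]).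
def Pre_func (mas : List (List Int)) : Prop := mas ≠ []
instance (mas : List (List Int)) : Decidable (Pre_func mas) := by unfold Pre_func; infer_instance
def pvWitness_func : List (List Int) := [[1, 2, 2], [2, 1, 3], [2, 5]]

def Spec_func (mas : List (List Int)) (out : Int) : Prop := out = func_alt mas
instance (mas : List (List Int)) (out : Int) : Decidable (Spec_func mas out) := by unfold Spec_func; infer_instance

-- ===== CLAIM (what is proved, stated in full; the proofs are below) =====
def Claim_equal_func : Prop := ∀ (mas : List (List Int)), Dom_func mas → Pre_func mas → Spec_func mas (func mas)

-- ===== LEMMAS AND PROOFS =====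

-- A's inner loop (with break) decides membership in every remaining row.
theorem funcInner_eq_all (x : Int) (rows : List (List Int)) :
    funcInner x rows = rows.all (fun r => r.contains x) := by
  induction rows with
  | nil => rfl
  | cons r rest ih =>
    simp only [funcInner, List.all_cons, bne, ih]
    cases r.contains x <;> simp

-- membership in the folded intersection
theorem mem_foldl_inter (x : Int) (rest : List (List Int)) (init : PySem.Set Int) :
    (x ∈ rest.foldl (fun c r => PySem.Set.inter c (PySem.Set.ofList r)) init) ↔
      x ∈ init ∧ ∀ r ∈ rest, x ∈ r := by
  induction rest generalizing init with
  | nil => simp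
  | cons r rest ih =>
    simp [ih, PySem.Set.mem_inter, PySem.Set.mem_ofList, and_assoc]

-- folding over range n with getD is folding over the list itself
theorem foldl_range_getD (l : List Int) (g : Int → Int → Int) (init : Int) :
    (List.range l.length).foldl (fun k i => g k (l.getD i 0)) init = l.foldl g init := by
  have hmap : (List.range l.length).map (fun i => l.getD i 0) = l := by
    apply List.ext_getElem
    · simp
    · intro i h1 h2
      simp [List.getD_eq_getElem?_getD, List.getElem?_eq_getElem h2]
  calc (List.range l.length).foldl (fun k i => g k (l.getD i 0)) init
      = ((List.range l.length).map (fun i => l.getD i 0)).foldl g init := by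
        rw [List.foldl_map]
    _ = l.foldl g init := by rw [hmap]

theorem foldl_count_true (l : List Int) (init : Int) :
    l.foldl (fun k (_ : Int) => k + 1) init = init + l.length := by
  induction l generalizing init with
  | nil => simp
  | cons a t ih => simp [List.foldl_cons, ih]; omega

-- ===== VERDICT (by name: the statement is the Claim_ definition above) =====
theorem func_spec : Claim_equal_func := by
  intro mas _hdom hpre
  unfold Spec_func func func_alt
  match mas with
  | [] => exact absurd rfl hpre
  | h :: tl =>
    simp only [List.headD_cons, List.drop_one, List.tail_cons]
    rw [foldl_range_getD h (fun k x => if funcInner x tl = true then k + 1 else k) 0]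
    match tl with
    | [] =>
      have : (fun (k : Int) (x : Int) => if funcInner x ([] : List (List Int)) = true then k + 1 else k)
           = fun k _ => k + 1 := by funext k x; simp [funcInner]
      rw [this, foldl_count_true, Int.zero_add]
    | r0 :: rest =>
      apply PySem.List.foldl_congr_mem
      intro acc x _
      have hiff : (funcInner x (r0 :: rest) = true) ↔
          (PySem.Set.contains
            (rest.foldl (fun c r => PySem.Set.inter c (PySem.Set.ofList r)) (PySem.Set.ofList r0)) x = true) := by
        rw [funcInner_eq_all, PySem.Set.contains_iff, mem_foldl_inter]
        simp [PySem.Set.mem_ofList, List.all_eq_true]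
      by_cases hx : funcInner x (r0 :: rest) = true
      · rw [if_pos hx, if_pos (hiff.mp hx)]
      · rw [if_neg hx, if_neg (fun hc => hx (hiff.mpr hc))]
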